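-- pv_equiv track=rewrite | github.com/wehu/infer | infer/lib/python/inferlib/scalalib.py | _is_empty_classpath
-- ===== SOURCE A (Python) =====
-- def _is_empty_classpath(string):
--     stripped = string.strip("'").strip('"')
--     if stripped == '':
--         return True
--     elif stripped == string:
--         return False
--     else:
--         return _is_empty_classpath(stripped)
-- ===== SOURCE B (Python) =====
-- def _is_empty_classpath(string):
--     # The recursive quote-stripping is empty at its fixpoint iff every
--     # character is a quote: one pass, no recursion.
--     return all(c in "'\"" for c in string)
-- ===== Notes on version B (the rewrite author's own statement) =====
-- stated objective: simpler
-- what changed: Replaced the recursive repeated end-stripping of single then double quotes (fixpoint recursion) by a closed-form one-pass check that every character of the string is a quote character, which is provably the same condition.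
import Mathlib
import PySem

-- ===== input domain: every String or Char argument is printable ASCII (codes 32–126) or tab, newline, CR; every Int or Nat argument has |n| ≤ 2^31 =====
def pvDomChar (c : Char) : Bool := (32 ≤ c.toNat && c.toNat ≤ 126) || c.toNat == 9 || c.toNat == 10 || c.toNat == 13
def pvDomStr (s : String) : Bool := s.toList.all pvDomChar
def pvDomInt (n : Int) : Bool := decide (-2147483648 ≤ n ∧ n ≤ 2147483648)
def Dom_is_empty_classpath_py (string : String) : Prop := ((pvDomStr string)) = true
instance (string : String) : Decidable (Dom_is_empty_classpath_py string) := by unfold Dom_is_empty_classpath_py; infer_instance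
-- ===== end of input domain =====

-- B replaces the recursive quote-strip fixpoint by a one-pass "all characters are quotes" check (simpler).


-- stripChars is an infix of its argument (needed by the port's termination proof)
theorem pv_strip_infix (cs chars : List Char) : PySem.Chars.stripChars cs chars <:+: cs := by
  unfold PySem.Chars.stripChars
  have h1 : List.dropWhile (fun c => chars.contains c) cs <:+ cs := List.dropWhile_suffix _
  have h2 : List.dropWhile (fun c => chars.contains c)
      (List.dropWhile (fun c => chars.contains c) cs).reverse <:+
      (List.dropWhile (fun c => chars.contains c) cs).reverse := List.dropWhile_suffix _
  have h3 : (List.dropWhile (fun c => chars.contains c)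
      (List.dropWhile (fun c => chars.contains c) cs).reverse).reverse <+:
      List.dropWhile (fun c => chars.contains c) cs :=
    List.reverse_suffix.mp (by simpa using h2)
  exact h3.isInfix.trans h1.isInfix

theorem pv_strip_len_le (cs chars : List Char) :
    (PySem.Chars.stripChars cs chars).length ≤ cs.length :=
  (pv_strip_infix cs chars).length_le

-- a strip that changes the string strictly shortens it (termination measure)
theorem pv_strip2_len_lt (cs : List Char) :
    PySem.Chars.stripChars (PySem.Chars.stripChars cs ['\'']) ['"'] ≠ cs →
    (PySem.Chars.stripChars (PySem.Chars.stripChars cs ['\'']) ['"']).length < cs.length := by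
  intro hne
  have hle1 : (PySem.Chars.stripChars (PySem.Chars.stripChars cs ['\'']) ['"']).length ≤
      (PySem.Chars.stripChars cs ['\'']).length := pv_strip_len_le _ _
  have hle2 : (PySem.Chars.stripChars cs ['\'']).length ≤ cs.length := pv_strip_len_le _ _
  by_contra h
  have h' : cs.length ≤
      (PySem.Chars.stripChars (PySem.Chars.stripChars cs ['\'']) ['"']).length := by omega
  have hr1eq : PySem.Chars.stripChars cs ['\''] = cs :=
    (pv_strip_infix cs ['\'']).eq_of_length (by omega)
  have hreq : PySem.Chars.stripChars (PySem.Chars.stripChars cs ['\'']) ['"'] =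
      PySem.Chars.stripChars cs ['\''] :=
    (pv_strip_infix (PySem.Chars.stripChars cs ['\'']) ['"']).eq_of_length (by omega)
  exact hne (hreq.trans hr1eq)

theorem pv_strip_toList_lt (s : String)
    (h : PySem.Str.stripChars (PySem.Str.stripChars s "'") "\"" ≠ s) :
    (PySem.Str.stripChars (PySem.Str.stripChars s "'") "\"").toList.length < s.toList.length := by
  have hne : (PySem.Str.stripChars (PySem.Str.stripChars s "'") "\"").toList ≠ s.toList := by
    intro hc; exact h (String.toList_inj.mp hc)
  have := pv_strip2_len_lt s.toList
  simp only [PySem.Str.toList_stripChars] at hne ⊢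
  exact this (by simpa using hne)

-- ===== PORT A =====
def is_empty_classpath_py (string : String) : Bool :=
  let stripped := PySem.Str.stripChars (PySem.Str.stripChars string "'") "\""
  if stripped = "" then true
  else if stripped = string then false
  else is_empty_classpath_py stripped
termination_by string.toList.length
decreasing_by exact pv_strip_toList_lt string (by assumption)

-- ===== PORT B =====
def is_empty_classpath_py_alt (string : String) : Bool :=
  string.toList.all (fun c => c == '\'' || c == '"')

-- ===== PRECONDITION & SPEC =====
def Spec_is_empty_classpath_py (string : String) (out : Bool) : Prop := out = is_empty_classpath_py_alt string
instance (string : String) (out : Bool) : Decidable (Spec_is_empty_classpath_py string out) := by unfold Spec_is_empty_classpath_py; infer_instance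

-- ===== CLAIM (what is proved, stated in full; the proofs are below) =====
def Claim_equal_is_empty_classpath_py : Prop := ∀ (string : String), Dom_is_empty_classpath_py string → Spec_is_empty_classpath_py string (is_empty_classpath_py string)

-- ===== LEMMAS AND PROOFS =====

def pvIsQuote (c : Char) : Bool := c == '\'' || c == '"'

-- stripping only quote characters does not change whether all characters are quotes
theorem pv_all_dropWhile (p : Char → Bool) (hp : ∀ c, p c = true → pvIsQuote c = true)
    (l : List Char) : (List.dropWhile p l).all pvIsQuote = l.all pvIsQuote := by
  conv_rhs => rw [← List.takeWhile_append_dropWhile (p := p) (l := l)]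
  rw [List.all_append]
  have : (List.takeWhile p l).all pvIsQuote = true := by
    rw [List.all_eq_true]; intro c hc; exact hp c (List.mem_takeWhile_imp hc)
  rw [this, Bool.true_and]

theorem pv_all_strip (chars : List Char) (hp : ∀ c, chars.contains c = true → pvIsQuote c = true)
    (l : List Char) : (PySem.Chars.stripChars l chars).all pvIsQuote = l.all pvIsQuote := by
  unfold PySem.Chars.stripChars
  simp only [List.all_reverse]
  rw [pv_all_dropWhile _ hp, List.all_reverse, pv_all_dropWhile _ hp]

-- if a strip fixes a nonempty string, its head is not in the stripped set
theorem pv_strip_fix_head (l chars : List Char) (hfix : PySem.Chars.stripChars l chars = l)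
    (hl : 0 < l.length) : chars.contains l[0] = false := by
  have hd : List.dropWhile (fun c => chars.contains c) l = l := by
    have hs : List.dropWhile (fun c => chars.contains c) l <:+ l := List.dropWhile_suffix _
    apply hs.eq_of_length
    have h1 : (PySem.Chars.stripChars l chars).length ≤
        (List.dropWhile (fun c => chars.contains c) l).length := by
      unfold PySem.Chars.stripChars
      simpa using (List.dropWhile_suffix (l := (List.dropWhile (fun c => chars.contains c) l).reverse)
        (fun c => chars.contains c)).length_le
    have h2 := hs.length_le
    rw [hfix] at h1; omega
  have := List.dropWhile_eq_self_iff.mp hd hl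
  simpa using this

theorem pv_main_aux : ∀ (n : Nat) (l : List Char), l.length = n →
    is_empty_classpath_py (String.ofList l) = l.all pvIsQuote := by
  intro n
  induction n using Nat.strong_induction_on with
  | _ n ih =>
    intro l hn
    have hq1 : ∀ c, (['\''] : List Char).contains c = true → pvIsQuote c = true := by
      intro c hc; simp [pvIsQuote]; simp at hc; left; exact hc
    have hq2 : ∀ c, (['"'] : List Char).contains c = true → pvIsQuote c = true := by
      intro c hc; simp [pvIsQuote]; simp at hc; right; exact hc
    rw [is_empty_classpath_py]
    set s := String.ofList l with hs
    have hsl : s.toList = l := by simp [hs]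
    set stripped := PySem.Str.stripChars (PySem.Str.stripChars s "'") "\"" with hst
    have hstl : stripped.toList = PySem.Chars.stripChars (PySem.Chars.stripChars l ['\'']) ['"'] := by
      simp [hst, PySem.Str.toList_stripChars, hsl]
    have hall : stripped.toList.all pvIsQuote = l.all pvIsQuote := by
      rw [hstl, pv_all_strip _ hq2, pv_all_strip _ hq1]
    by_cases h1 : stripped = ""
    · rw [if_pos h1]
      have hnil : stripped.toList = [] := by simp [h1]
      rw [hnil] at hall
      simp only [List.all_nil] at hall
      exact hall
    · rw [if_neg h1]
      by_cases h2 : stripped = s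
      · rw [if_pos h2]
        -- the strip fixed s: head of l is neither quote
        have hfix : PySem.Chars.stripChars (PySem.Chars.stripChars l ['\'']) ['"'] = l := by
          rw [← hstl, h2, hsl]
        have hlne : 0 < l.length := by
          rcases Nat.eq_zero_or_pos l.length with h | h
          · exfalso; apply h1
            rw [h2, hs]
            have : l = [] := List.length_eq_zero_iff.mp h
            simp [this]
          · exact h
        have hr1 : PySem.Chars.stripChars l ['\''] = l := by
          have hle1 : (PySem.Chars.stripChars (PySem.Chars.stripChars l ['\'']) ['"']).length ≤
              (PySem.Chars.stripChars l ['\'']).length := pv_strip_len_le _ _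
          have hle2 : (PySem.Chars.stripChars l ['\'']).length ≤ l.length := pv_strip_len_le _ _
          rw [hfix] at hle1
          exact (pv_strip_infix l ['\'']).eq_of_length (by omega)
        have hh1 : (['\''] : List Char).contains l[0] = false := pv_strip_fix_head l _ hr1 hlne
        have hh2 : (['"'] : List Char).contains l[0] = false := by
          apply pv_strip_fix_head l _ _ hlne
          rw [hr1] at hfix; exact hfix
        simp at hh1 hh2
        symm
        rw [List.all_eq_false]
        exact ⟨l[0], List.getElem_mem hlne, by simp [pvIsQuote, hh1, hh2]⟩
      · rw [if_neg h2]
        have hlt : stripped.toList.length < l.length := by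
          rw [hstl]
          exact pv_strip2_len_lt l (by intro hc; apply h2; rw [← String.toList_inj, hstl, hc, hsl])
        have := ih stripped.toList.length (hn ▸ hlt) stripped.toList rfl
        rw [String.ofList_toList] at this
        rw [this, hall]

-- ===== VERDICT (by name: the statement is the Claim_ definition above) =====
theorem is_empty_classpath_py_spec : Claim_equal_is_empty_classpath_py := by
  intro s _
  unfold Spec_is_empty_classpath_py is_empty_classpath_py_alt
  have := pv_main_aux s.toList.length s.toList rfl
  rw [String.ofList_toList] at this
  rw [this]
  rfl
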